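-- pv_equiv track=rewrite | github.com/Manavpreeet/prep-forge | scripts/leetcode_import.py | map_pattern
-- ===== SOURCE A (Python) =====
-- from typing import Dict, List, Optional
--
-- TAG_TO_PATTERN: Dict[str, str] = {
--     "array": "arrays-hashing",
--     "hash-table": "arrays-hashing",
--     "string": "arrays-hashing",
--     "sorting": "arrays-hashing",
--     "counting": "arrays-hashing",
--     "prefix-sum": "arrays-hashing",
--     "two-pointers": "two-pointers",
--     "sliding-window": "sliding-window",
--     "binary-search": "binary-search",
--     "linked-list": "linked-list",
--     "tree": "trees",
--     "binary-tree": "trees",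
--     "binary-search-tree": "trees",
--     "n-ary-tree": "trees",
--     "graph": "graphs",
--     "depth-first-search": "graphs",
--     "breadth-first-search": "graphs",
--     "union-find": "graphs",
--     "topological-sort": "graphs",
--     "shortest-path": "graphs",
--     "backtracking": "backtracking",
--     "recursion": "backtracking",
--     "dynamic-programming": "dynamic-programming",
--     "memoization": "dynamic-programming",
--     "greedy": "greedy",
--     "interval": "intervals",
--     "line-sweep": "intervals",
--     "heap-priority-queue": "heap-priority-queue",
--     "design": "heap-priority-queue",
--     "stack": "arrays-hashing",
--     "queue": "arrays-hashing",
--     "matrix": "arrays-hashing",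
--     "bit-manipulation": "arrays-hashing",
--     "math": "arrays-hashing",
--     "simulation": "arrays-hashing",
--     "ordered-set": "heap-priority-queue",
--     "data-stream": "heap-priority-queue",
--     "segment-tree": "trees",
--     "binary-indexed-tree": "trees",
--     "trie": "trees",
--     "monotonic-stack": "intervals",
--     "monotonic-queue": "sliding-window",
--     "string-matching": "sliding-window",
--     "rolling-hash": "sliding-window",
--     "divide-and-conquer": "binary-search",
--     "combinatorics": "backtracking",
--     "bitmask": "backtracking",
--     "number-theory": "dynamic-programming",
-- }
--
-- def map_pattern(tag_slugs: List[str], title: str) -> str: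
--     # Vote across all tags so ordering of LeetCode tags does not dominate mapping.
--     votes: Dict[str, int] = {}
--     for slug in tag_slugs:
--         pattern = TAG_TO_PATTERN.get(slug)
--         if pattern:
--             votes[pattern] = votes.get(pattern, 0) + 1
--
--     if votes:
--         ranked = sorted(votes.items(), key=lambda item: (-item[1], item[0]))
--         return ranked[0][0]
--
--     # Heuristics fallback by title keywords
--     title_l = title.lower()
--     if "window" in title_l:
--         return "sliding-window"
--     if "pointer" in title_l:
--         return "two-pointers"
--     if "tree" in title_l:
--         return "trees"
--     if "graph" in title_l:
--         return "graphs"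
--     if "interval" in title_l:
--         return "intervals"
--
--     return "arrays-hashing"
-- ===== SOURCE B (Python) =====
-- from typing import Dict, List
--
-- TAG_TO_PATTERN: Dict[str, str] = {
--     "array": "arrays-hashing",
--     "hash-table": "arrays-hashing",
--     "string": "arrays-hashing",
--     "sorting": "arrays-hashing",
--     "counting": "arrays-hashing",
--     "prefix-sum": "arrays-hashing",
--     "two-pointers": "two-pointers",
--     "sliding-window": "sliding-window",
--     "binary-search": "binary-search",
--     "linked-list": "linked-list",
--     "tree": "trees",
--     "binary-tree": "trees",
--     "binary-search-tree": "trees",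
--     "n-ary-tree": "trees",
--     "graph": "graphs",
--     "depth-first-search": "graphs",
--     "breadth-first-search": "graphs",
--     "union-find": "graphs",
--     "topological-sort": "graphs",
--     "shortest-path": "graphs",
--     "backtracking": "backtracking",
--     "recursion": "backtracking",
--     "dynamic-programming": "dynamic-programming",
--     "memoization": "dynamic-programming",
--     "greedy": "greedy",
--     "interval": "intervals",
--     "line-sweep": "intervals",
--     "heap-priority-queue": "heap-priority-queue",
--     "design": "heap-priority-queue",
--     "stack": "arrays-hashing",
--     "queue": "arrays-hashing",
--     "matrix": "arrays-hashing",
--     "bit-manipulation": "arrays-hashing",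
--     "math": "arrays-hashing",
--     "simulation": "arrays-hashing",
--     "ordered-set": "heap-priority-queue",
--     "data-stream": "heap-priority-queue",
--     "segment-tree": "trees",
--     "binary-indexed-tree": "trees",
--     "trie": "trees",
--     "monotonic-stack": "intervals",
--     "monotonic-queue": "sliding-window",
--     "string-matching": "sliding-window",
--     "rolling-hash": "sliding-window",
--     "divide-and-conquer": "binary-search",
--     "combinatorics": "backtracking",
--     "bitmask": "backtracking",
--     "number-theory": "dynamic-programming",
-- }
--
-- FALLBACK_KEYWORDS = (
--     ("window", "sliding-window"),
--     ("pointer", "two-pointers"),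
--     ("tree", "trees"),
--     ("graph", "graphs"),
--     ("interval", "intervals"),
-- )
--
-- def map_pattern(tag_slugs: List[str], title: str) -> str:
--     # Tally votes over the mapped patterns (same linear tally as before).
--     patterns = [TAG_TO_PATTERN[s] for s in tag_slugs if s in TAG_TO_PATTERN]
--     votes: Dict[str, int] = {}
--     for p in patterns:
--         votes[p] = votes.get(p, 0) + 1
--
--     # Single scan instead of sorting: keep the (count-max, name-min) winner.
--     best = None
--     for p, c in votes.items():
--         if best is None or c > best[1] or (c == best[1] and p < best[0]):
--             best = (p, c)
--     if best is not None:
--         return best[0]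
--
--     # Title-keyword fallback as a table scan.
--     title_l = title.lower()
--     for kw, pat in FALLBACK_KEYWORDS:
--         if kw in title_l:
--             return pat
--     return "arrays-hashing"
-- ===== Notes on version B (the rewrite author's own statement) =====
-- stated objective: alternative
-- what changed: Replaces sorting the whole votes dict by (-count, name) and taking the first element with a single linear scan over votes.items() that maintains the best (pattern, count) pair, and replaces the hard-coded if-chain of title keywords with a table scan.
import Mathlib
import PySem

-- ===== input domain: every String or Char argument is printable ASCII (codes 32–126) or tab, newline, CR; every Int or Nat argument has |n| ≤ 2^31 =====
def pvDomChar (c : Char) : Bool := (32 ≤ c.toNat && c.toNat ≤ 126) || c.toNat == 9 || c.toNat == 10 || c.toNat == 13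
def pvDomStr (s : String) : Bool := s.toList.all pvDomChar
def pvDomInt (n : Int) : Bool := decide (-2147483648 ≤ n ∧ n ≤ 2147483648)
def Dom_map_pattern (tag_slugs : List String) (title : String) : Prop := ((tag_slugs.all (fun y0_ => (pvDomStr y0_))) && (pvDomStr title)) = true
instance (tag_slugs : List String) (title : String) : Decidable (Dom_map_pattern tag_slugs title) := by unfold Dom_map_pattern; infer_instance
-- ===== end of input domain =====

-- B replaces the sort-then-take-first over the votes dict with a single best-so-far scan
-- (and the keyword if-chain with a table scan): an alternative of the same cost.

-- ===== PORT A =====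

def TAG_TO_PATTERN : PySem.Dict String String := PySem.Dict.ofList [
  ("array", "arrays-hashing"), ("hash-table", "arrays-hashing"), ("string", "arrays-hashing"),
  ("sorting", "arrays-hashing"), ("counting", "arrays-hashing"), ("prefix-sum", "arrays-hashing"),
  ("two-pointers", "two-pointers"), ("sliding-window", "sliding-window"), ("binary-search", "binary-search"),
  ("linked-list", "linked-list"), ("tree", "trees"), ("binary-tree", "trees"),
  ("binary-search-tree", "trees"), ("n-ary-tree", "trees"), ("graph", "graphs"),
  ("depth-first-search", "graphs"), ("breadth-first-search", "graphs"), ("union-find", "graphs"),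
  ("topological-sort", "graphs"), ("shortest-path", "graphs"), ("backtracking", "backtracking"),
  ("recursion", "backtracking"), ("dynamic-programming", "dynamic-programming"), ("memoization", "dynamic-programming"),
  ("greedy", "greedy"), ("interval", "intervals"), ("line-sweep", "intervals"),
  ("heap-priority-queue", "heap-priority-queue"), ("design", "heap-priority-queue"), ("stack", "arrays-hashing"),
  ("queue", "arrays-hashing"), ("matrix", "arrays-hashing"), ("bit-manipulation", "arrays-hashing"),
  ("math", "arrays-hashing"), ("simulation", "arrays-hashing"), ("ordered-set", "heap-priority-queue"),
  ("data-stream", "heap-priority-queue"), ("segment-tree", "trees"), ("binary-indexed-tree", "trees"),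
  ("trie", "trees"), ("monotonic-stack", "intervals"), ("monotonic-queue", "sliding-window"),
  ("string-matching", "sliding-window"), ("rolling-hash", "sliding-window"), ("divide-and-conquer", "binary-search"),
  ("combinatorics", "backtracking"), ("bitmask", "backtracking"), ("number-theory", "dynamic-programming")]

-- votes[pattern] = votes.get(pattern, 0) + 1, guarded by 'if pattern:' (truthiness of the Optional lookup)
def mpVotesA (tag_slugs : List String) : PySem.Dict String Int :=
  tag_slugs.foldl (fun votes slug =>
    match TAG_TO_PATTERN.get? slug with
    | some pattern => if pattern ≠ "" then votes.insert pattern (votes.getD pattern 0 + 1) else votes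
    | none => votes) PySem.Dict.empty

-- the title-keyword fallback chain, verbatim
def mpFallbackA (title : String) : String :=
  let title_l := PySem.Str.lower title
  if PySem.Str.isIn "window" title_l then "sliding-window"
  else if PySem.Str.isIn "pointer" title_l then "two-pointers"
  else if PySem.Str.isIn "tree" title_l then "trees"
  else if PySem.Str.isIn "graph" title_l then "graphs"
  else if PySem.Str.isIn "interval" title_l then "intervals"
  else "arrays-hashing"

-- 'if votes:' + 'ranked[0][0]': sorted(votes.items(), key=(-count, name)) is nonempty iff the dict is,
-- so the port matches on the sorted list (sorted [] = [], exactly the empty-dict branch).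
def map_pattern (tag_slugs : List String) (title : String) : String :=
  let votes := mpVotesA tag_slugs
  match PySem.List.sorted2 votes.items (fun it => -it.2) (fun it => it.1) with
  | ranked0 :: _ => ranked0.1
  | [] => mpFallbackA title

-- ===== PORT B =====

def FALLBACK_KEYWORDS : List (String × String) :=
  [("window", "sliding-window"), ("pointer", "two-pointers"), ("tree", "trees"),
   ("graph", "graphs"), ("interval", "intervals")]

-- '[TAG_TO_PATTERN[s] for s in tag_slugs if s in TAG_TO_PATTERN]': filterMap get? is exactly
-- the membership test followed by the (then always succeeding) subscript.
def map_pattern_alt (tag_slugs : List String) (title : String) : String :=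
  let patterns := tag_slugs.filterMap (fun s => TAG_TO_PATTERN.get? s)
  let votes := patterns.foldl (fun d p => d.insert p (d.getD p 0 + 1)) PySem.Dict.empty
  let best := votes.items.foldl (fun b yc =>
    match b with
    | none => some yc
    | some bc => if yc.2 > bc.2 || (yc.2 == bc.2 && yc.1 < bc.1) then some yc else some bc)
    (none : Option (String × Int))
  match best with
  | some bc => bc.1
  | none =>
    let title_l := PySem.Str.lower title
    match FALLBACK_KEYWORDS.findSome? (fun kp => if PySem.Str.isIn kp.1 title_l then some kp.2 else none) with
    | some pat => pat
    | none => "arrays-hashing"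

-- ===== PRECONDITION & SPEC =====
def Spec_map_pattern (tag_slugs : List String) (title : String) (out : String) : Prop := out = map_pattern_alt tag_slugs title
instance (tag_slugs : List String) (title : String) (out : String) : Decidable (Spec_map_pattern tag_slugs title out) := by unfold Spec_map_pattern; infer_instance

-- ===== CLAIM (what is proved, stated in full; the proofs are below) =====
def Claim_equal_map_pattern : Prop := ∀ (tag_slugs : List String) (title : String), Dom_map_pattern tag_slugs title → Spec_map_pattern tag_slugs title (map_pattern tag_slugs title)

-- ===== LEMMAS AND PROOFS =====
set_option maxRecDepth 10000

-- every value of the tag table is a nonempty string, so A's truthiness guard always passes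
theorem tag_val_ne (s p : String) (h : TAG_TO_PATTERN.get? s = some p) : p ≠ "" := by
  have hall : TAG_TO_PATTERN.items.all (fun q => !(q.2 == "")) = true := by decide
  simp only [PySem.Dict.get?, Option.map_eq_some_iff] at h
  obtain ⟨q, hq, rfl⟩ := h
  have hmem := List.mem_of_find?_eq_some hq
  have := List.all_eq_true.mp hall q hmem
  simpa using this

-- the two vote tallies build the same dict
theorem votes_eq (tag_slugs : List String) :
    mpVotesA tag_slugs =
      (tag_slugs.filterMap (fun s => TAG_TO_PATTERN.get? s)).foldl
        (fun d p => d.insert p (d.getD p 0 + 1)) PySem.Dict.empty := by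
  unfold mpVotesA
  suffices h : ∀ (slugs : List String) (d : PySem.Dict String Int),
      slugs.foldl (fun votes slug =>
        match TAG_TO_PATTERN.get? slug with
        | some pattern => if pattern ≠ "" then votes.insert pattern (votes.getD pattern 0 + 1) else votes
        | none => votes) d =
      (slugs.filterMap (fun s => TAG_TO_PATTERN.get? s)).foldl
        (fun d p => d.insert p (d.getD p 0 + 1)) d from h tag_slugs _
  intro slugs
  induction slugs with
  | nil => intro d; rfl
  | cons s t ih =>
    intro d
    cases hg : TAG_TO_PATTERN.get? s with
    | none =>
      simp only [List.foldl_cons, List.filterMap_cons, hg]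
      exact ih d
    | some p =>
      have hne := tag_val_ne s p hg
      simp only [List.foldl_cons, List.filterMap_cons, hg, if_pos hne]
      exact ih _

-- head of the insertion sort = best-so-far fold over the same comparison
theorem foldl_insertBy_head {α : Type} (before : α → α → Bool) :
    ∀ (t : List α) (a : α) (l : List α), ∃ l',
      List.foldl (fun acc y => PySem.List.insertBy before y acc) (a :: l) t =
        (List.foldl (fun b y => if before y b then y else b) a t) :: l' := by
  intro t
  induction t with
  | nil => intro a l; exact ⟨l, rfl⟩
  | cons y t ih =>
    intro a l
    cases hb : before y a with
    | true =>
      obtain ⟨l', hl'⟩ := ih y (a :: l)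
      exact ⟨l', by simpa [PySem.List.insertBy, hb] using hl'⟩
    | false =>
      obtain ⟨l', hl'⟩ := ih a (PySem.List.insertBy before y l)
      exact ⟨l', by simpa [PySem.List.insertBy, hb] using hl'⟩

-- B's Option-valued fold, once seeded, is the plain best-so-far fold
theorem foldl_opt (cond : (String × Int) → (String × Int) → Bool) :
    ∀ (t : List (String × Int)) (b : String × Int),
      t.foldl (fun acc yc =>
        match acc with
        | none => some yc
        | some bc => if cond yc bc then some yc else some bc) (some b) =
      some (t.foldl (fun bc yc => if cond yc bc then yc else bc) b) := by
  intro t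
  induction t with
  | nil => intro b; rfl
  | cons y t ih =>
    intro b
    cases h : cond y b <;> simp [List.foldl_cons, h, ih]

-- A's sorted2 comparison and B's update test are the same Boolean
theorem cond_eq (y b : String × Int) :
    (decide (-y.2 < -b.2) || (!decide (-b.2 < -y.2) && decide (y.1 < b.1))) =
      (decide (b.2 < y.2) || (y.2 == b.2 && decide (y.1 < b.1))) := by
  by_cases h1 : b.2 < y.2
  · simp [h1, show -y.2 < -b.2 by omega]
  · by_cases h2 : y.2 = b.2
    · simp [h2]
    · have hlt : y.2 < b.2 := by omega
      simp [show ¬(-y.2 < -b.2) by omega, show -b.2 < -y.2 by omega, h1,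
        show (y.2 == b.2) = false by simpa using h2]

-- the two fallbacks agree
theorem fallback_eq (title : String) :
    mpFallbackA title =
      (match FALLBACK_KEYWORDS.findSome?
          (fun kp => if PySem.Str.isIn kp.1 (PySem.Str.lower title) then some kp.2 else none) with
        | some pat => pat
        | none => "arrays-hashing") := by
  unfold mpFallbackA FALLBACK_KEYWORDS
  cases h1 : PySem.Str.isIn "window" (PySem.Str.lower title) <;>
    cases h2 : PySem.Str.isIn "pointer" (PySem.Str.lower title) <;>
      cases h3 : PySem.Str.isIn "tree" (PySem.Str.lower title) <;>
        cases h4 : PySem.Str.isIn "graph" (PySem.Str.lower title) <;>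
          cases h5 : PySem.Str.isIn "interval" (PySem.Str.lower title) <;>
            simp only [List.findSome?_cons, List.findSome?_nil, h1, h2, h3, h4, h5] <;> rfl

-- ===== VERDICT (by name: the statement is the Claim_ definition above) =====
theorem map_pattern_spec : Claim_equal_map_pattern := by
  intro tag_slugs title _
  unfold Spec_map_pattern
  simp only [map_pattern, map_pattern_alt]
  rw [← votes_eq]
  cases hxs : (mpVotesA tag_slugs).items with
  | nil =>
    simp only [PySem.List.sorted2, List.foldl_nil]
    exact fallback_eq title
  | cons x t =>
    simp only [PySem.List.sorted2, if_neg (by decide : ¬ (false = true)), List.foldl_cons]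
    have hstart : PySem.List.insertBy
        (fun a b => decide ((fun it : String × Int => -it.2) a < (fun it : String × Int => -it.2) b) ||
          (!decide ((fun it : String × Int => -it.2) b < (fun it : String × Int => -it.2) a) &&
            decide ((fun it : String × Int => it.1) a < (fun it : String × Int => it.1) b)))
        x [] = [x] := rfl
    obtain ⟨l', hl'⟩ := foldl_insertBy_head
      (fun a b : String × Int => decide (-a.2 < -b.2) || (!decide (-b.2 < -a.2) && decide (a.1 < b.1))) t x []
    simp only [hstart, hl']
    rw [foldl_opt (fun yc bc : String × Int => yc.2 > bc.2 || (yc.2 == bc.2 && yc.1 < bc.1))]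
    have hfun : (fun (b y : String × Int) =>
          if (decide (-y.2 < -b.2) || !decide (-b.2 < -y.2) && decide (y.1 < b.1)) = true then y else b)
        = (fun (bc yc : String × Int) =>
          if (decide (yc.2 > bc.2) || yc.2 == bc.2 && decide (yc.1 < bc.1)) = true then yc else bc) := by
      funext b y
      simp only [gt_iff_lt]
      rw [cond_eq]
    rw [hfun]
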